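-- pv_equiv track=rewrite | github.com/hghyhghy/Codechef-Coding-Ninja | T45/6.py | occurance_of_word
-- ===== SOURCE A (Python) =====
-- def occurance_of_word(words):
--
--     words=words.split()
--
--     count={}
--     for word in words:
--         if word in count:
--
--            count[word] += 1
--
--         else:
--             count[word] = 1
--
--     return count
-- ===== SOURCE B (Python) =====
-- def occurance_of_word(words):
--     tokens = words.split()
--     return {w: tokens.count(w) for w in dict.fromkeys(tokens)}
-- ===== Notes on version B (the rewrite author's own statement) =====
-- stated objective: simpler
-- what changed: Replaced the per-token hash-increment loop with a two-phase dedup-then-count: collect the distinct words in first-occurrence order (dict.fromkeys) and emit each with tokens.count(w) in one comprehension.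
import Mathlib
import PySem

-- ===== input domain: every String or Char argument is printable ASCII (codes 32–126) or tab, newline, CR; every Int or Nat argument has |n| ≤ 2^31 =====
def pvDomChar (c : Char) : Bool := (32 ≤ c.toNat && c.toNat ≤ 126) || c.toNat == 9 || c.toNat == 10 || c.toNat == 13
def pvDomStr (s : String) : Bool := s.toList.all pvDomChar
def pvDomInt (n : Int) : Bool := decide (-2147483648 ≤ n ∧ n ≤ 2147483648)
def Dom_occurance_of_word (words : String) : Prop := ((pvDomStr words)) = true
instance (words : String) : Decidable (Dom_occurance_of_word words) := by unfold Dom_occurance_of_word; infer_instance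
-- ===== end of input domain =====

-- ===== PORT A =====
-- A: split, then one pass over tokens incrementing a per-word dict entry.
def occurance_of_word (words : String) : List (String × Int) :=
  (((PySem.Str.split₀ words).foldl
      (fun d w => if d.contains w then d.insert w (d.getD w 0 + 1) else d.insert w 1)
      PySem.Dict.empty : PySem.Dict String Int)).items

-- ===== PORT B =====
-- B (simpler): distinct words in first-occurrence order, each paired with its count.
def occurance_of_word_alt (words : String) : List (String × Int) :=
  (PySem.List.dedup (PySem.Str.split₀ words)).map
    (fun w => (w, ((PySem.Str.split₀ words).count w : Int)))

-- ===== PRECONDITION & SPEC =====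
def Spec_occurance_of_word (words : String) (out : List (String × Int)) : Prop := out = occurance_of_word_alt words
instance (words : String) (out : List (String × Int)) : Decidable (Spec_occurance_of_word words out) := by unfold Spec_occurance_of_word; infer_instance

-- ===== CLAIM (what is proved, stated in full; the proofs are below) =====
def Claim_equal_occurance_of_word : Prop := ∀ (words : String), Dom_occurance_of_word words → Spec_occurance_of_word words (occurance_of_word words)

-- ===== LEMMAS AND PROOFS =====

-- A's branch is uniformly 'insert w (getD w 0 + 1)': a missing key has getD 0.
lemma fold_step_eq (d : PySem.Dict String Int) (w : String) :
    (if d.contains w then d.insert w (d.getD w 0 + 1) else d.insert w 1)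
      = d.insert w (d.getD w 0 + 1) := by
  by_cases h : d.contains w = true
  · simp [h]
  · have h0 : d.getD w 0 = 0 := by
      have : d.get? w = none := by
        rw [PySem.Dict.get?_eq_none_iff_contains]; simp_all
      simp [PySem.Dict.getD, this]
    simp [h, h0]

-- ===== VERDICT (by name: the statement is the Claim_ definition above) =====
theorem occurance_of_word_spec : Claim_equal_occurance_of_word := by
  intro words _
  unfold Spec_occurance_of_word occurance_of_word occurance_of_word_alt
  simp only [fold_step_eq]
  rw [PySem.Dict.foldl_insert_getD_add_one_eq_counter, PySem.Dict.items_counter]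
  simp
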